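-- pv_equiv track=rewrite | github.com/dev1203/Kattis-Solutions | okvir.py | send_pattern_hash
-- ===== SOURCE A (Python) =====
-- def send_pattern_hash(length):
--     str = ""
--     for val in range(0,length):
--         if val%2 == 0:
--             str= str+"#"
--         else:
--             str= str+"."
--     return str
-- ===== SOURCE B (Python) =====
-- def send_pattern_hash(length):
--     return ('#.' * ((length + 1) // 2))[:length]
-- ===== Notes on version B (the rewrite author's own statement) =====
-- stated objective: faster
-- what changed: Replaces the per-index loop with its parity branch and repeated string concatenation by one bulk construction: repeat the two-character unit and slice the result to the requested length.
import Mathlib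
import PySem

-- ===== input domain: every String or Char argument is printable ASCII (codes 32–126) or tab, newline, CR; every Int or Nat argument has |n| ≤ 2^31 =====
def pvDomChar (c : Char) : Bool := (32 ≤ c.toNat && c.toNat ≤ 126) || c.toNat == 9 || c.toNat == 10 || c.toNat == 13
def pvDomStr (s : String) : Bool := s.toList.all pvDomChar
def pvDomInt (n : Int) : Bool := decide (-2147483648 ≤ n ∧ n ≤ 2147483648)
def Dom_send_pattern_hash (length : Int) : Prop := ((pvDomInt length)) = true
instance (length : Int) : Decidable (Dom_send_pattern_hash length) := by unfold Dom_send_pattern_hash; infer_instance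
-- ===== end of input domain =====

-- B replaces the per-index loop with a parity branch by one bulk construction ("#." repeated (length+1)//2 times, sliced to [:length]); same return value for every int length.
-- ===== PORT A =====
-- str = ""; for val in range(0, length): str += "#" if val % 2 == 0 else "."  (string kept as List Char per convention)
def send_pattern_hash (length : Int) : String :=
  String.ofList ((PySem.List.pyRange 0 length 1).foldl
    (fun s val => if PySem.Int.mod val 2 == 0 then s ++ ['#'] else s ++ ['.']) [])

-- ===== PORT B =====
-- ('#.' * ((length + 1) // 2))[:length]
def send_pattern_hash_alt (length : Int) : String :=
  String.ofList (PySem.List.slice (PySem.List.pyRepeat ['#', '.'] (PySem.Int.floordiv (length + 1) 2)) none (some length))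

-- ===== PRECONDITION & SPEC =====
def Spec_send_pattern_hash (length : Int) (out : String) : Prop := out = send_pattern_hash_alt length
instance (length : Int) (out : String) : Decidable (Spec_send_pattern_hash length out) := by unfold Spec_send_pattern_hash; infer_instance

-- ===== CLAIM (what is proved, stated in full; the proofs are below) =====
def Claim_equal_send_pattern_hash : Prop := ∀ (length : Int), Dom_send_pattern_hash length → Spec_send_pattern_hash length (send_pattern_hash length)

-- ===== LEMMAS AND PROOFS =====

-- ===== VERDICT (by name: the statement is the Claim_ definition above) =====
-- the alternating pattern character at index k
def pvPat (k : Nat) : Char := if k % 2 = 0 then '#' else '.'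

lemma pvRepeat_eq_map (m : Nat) :
    PySem.List.pyRepeat ['#', '.'] (m : Int) = (List.range (2 * m)).map pvPat := by
  induction m with
  | zero => simp [PySem.List.pyRepeat]
  | succ m ih =>
    have h2 : 2 * (m + 1) = 2 + 2 * m := by ring
    rw [h2, List.range_add]
    have : (List.range (2 * m)).map (fun k => pvPat (2 + k)) = (List.range (2 * m)).map pvPat := by
      apply List.map_congr_left; intro k _
      simp [pvPat, Nat.add_comm 2 k]
    simp only [List.map_append, List.map_map]
    rw [show ((List.range 2).map pvPat) = ['#', '.'] by decide]
    simp only [Function.comp_def, this]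
    rw [← ih]
    simp [PySem.List.pyRepeat, List.replicate_succ]

lemma pvAlt_chars (n : Nat) :
    PySem.List.slice (PySem.List.pyRepeat ['#', '.'] (PySem.Int.floordiv ((n : Int) + 1) 2)) none (some (n : Int))
      = (List.range n).map pvPat := by
  have hc : ((n : Int) + 1) = (((n + 1 : Nat)) : Int) := by push_cast; ring
  have hf : PySem.Int.floordiv (((n + 1 : Nat)) : Int) 2 = (((n + 1) / 2 : Nat) : Int) := by
    exact_mod_cast PySem.Int.floordiv_natCast (n + 1) 2
  rw [hc, hf, pvRepeat_eq_map, PySem.List.slice_to_natCast,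
    ← List.map_take, List.take_range, Nat.min_eq_left (by omega)]

theorem send_pattern_hash_spec : Claim_equal_send_pattern_hash := by
  intro length _
  unfold Spec_send_pattern_hash send_pattern_hash send_pattern_hash_alt
  by_cases h : length ≤ 0
  · -- empty pattern on both sides
    have hr : PySem.List.pyRange 0 length 1 = [] := PySem.List.pyRange_one_eq_nil h
    have hm : PySem.Int.floordiv (length + 1) 2 < 1 := by
      rw [PySem.Int.floordiv_lt_iff_lt_mul (by omega)]; omega
    have hm0 : (PySem.Int.floordiv (length + 1) 2).toNat = 0 := by omega
    have hrep : PySem.List.pyRepeat (['#', '.'] : List Char) (PySem.Int.floordiv (length + 1) 2) = [] := by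
      unfold PySem.List.pyRepeat; rw [hm0]; rfl
    rw [hr, hrep]
    simp [PySem.List.slice]
  · -- length = ↑n with 0 < n
    obtain ⟨n, rfl⟩ : ∃ n : Nat, length = (n : Int) := ⟨length.toNat, by omega⟩
    have hloop : (PySem.List.pyRange 0 (n : Int) 1).foldl
        (fun s val => if PySem.Int.mod val 2 == 0 then s ++ ['#'] else s ++ ['.']) []
        = (List.range n).map pvPat := by
      have hstep : ∀ (s : List Char) (val : Int),
          (if PySem.Int.mod val 2 == 0 then s ++ ['#'] else s ++ ['.'])
            = s ++ [if PySem.Int.mod val 2 == 0 then '#' else '.'] := by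
        intro s val; split <;> rfl
      calc (PySem.List.pyRange 0 (n : Int) 1).foldl
              (fun s val => if PySem.Int.mod val 2 == 0 then s ++ ['#'] else s ++ ['.']) []
          = (PySem.List.pyRange 0 (n : Int) 1).foldl
              (fun s val => s ++ [if PySem.Int.mod val 2 == 0 then '#' else '.']) [] := by
            simp only [hstep]
        _ = (List.range n).map pvPat := by
            rw [PySem.List.foldl_append_singleton_eq_map, PySem.List.pyRange_zero_nat,
              List.map_map]
            simp only [List.nil_append, Function.comp_def]
            apply List.map_congr_left; intro k _
            have hk2 : PySem.Int.mod (k : Int) 2 = ((k % 2 : Nat) : Int) := by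
              exact_mod_cast PySem.Int.mod_natCast k 2
            rw [hk2]
            rcases Nat.mod_two_eq_zero_or_one k with hk | hk <;> simp [pvPat, hk]
    rw [hloop, pvAlt_chars]
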